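-- pv_equiv track=rewrite | github.com/jaydeepmalvya02/NQT | AnyBaseMultip;ly.py | SingleMul
-- ===== SOURCE A (Python) =====
-- def SingleMul(b,d1,r2):
--
--     ans=0
--     c=0
--     p=1
--
--     while d1>0 or c>0:
--
--         r1 = d1 % 10
--         d1 = d1 // 10
--         d = r1 * r2+c
--         c=d//b
--         d=d%b
--         ans+=p*d
--         p*=10
--     return ans
-- ===== SOURCE B (Python) =====
-- def SingleMul(b, d1, r2):
--     # Phase 1: peel decimal digits of d1, low to high.
--     digits = []
--     while d1 > 0:
--         digits.append(d1 % 10)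
--         d1 //= 10
--     # Phase 2: multiply each digit by r2 with base-b carry, collecting base-b digits.
--     out = []
--     c = 0
--     for g in digits:
--         d = g * r2 + c
--         out.append(d % b)
--         c = d // b
--     # Drain remaining carry.
--     while c > 0:
--         out.append(c % b)
--         c //= b
--     # Reassemble positionally: Horner from the most-significant end.
--     ans = 0
--     for dig in reversed(out):
--         ans = ans * 10 + dig
--     return ans
-- ===== Notes on version B (the rewrite author's own statement) =====
-- stated objective: alternative
-- what changed: A interleaves digit-peeling, carry propagation and positional accumulation in one while loop; B separates them into phases: peel the decimal digits into a list, fold the multiply-with-carry over that list emitting base-b digits, drain the remaining carry, then reassemble with a reversed Horner pass ans=ans*10+dig.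
-- outside the precondition, e.g. on SingleMul(1, 5, 0): A returns 0, B returns 0; on SingleMul(0, 5, 3): A raises ZeroDivisionError, B raises ZeroDivisionError
import Mathlib
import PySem

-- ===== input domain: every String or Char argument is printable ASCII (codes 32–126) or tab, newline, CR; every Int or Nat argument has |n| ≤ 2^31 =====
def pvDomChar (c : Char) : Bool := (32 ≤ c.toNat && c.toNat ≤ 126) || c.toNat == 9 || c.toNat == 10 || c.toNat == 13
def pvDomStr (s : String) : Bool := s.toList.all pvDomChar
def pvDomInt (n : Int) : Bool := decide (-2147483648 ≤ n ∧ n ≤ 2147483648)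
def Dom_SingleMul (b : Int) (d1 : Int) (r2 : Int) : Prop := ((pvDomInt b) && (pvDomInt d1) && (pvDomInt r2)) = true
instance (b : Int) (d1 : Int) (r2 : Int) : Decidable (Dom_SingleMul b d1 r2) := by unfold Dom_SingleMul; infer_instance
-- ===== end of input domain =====

-- B re-implements A's single interleaved multiply-with-carry loop as separate phases
-- (peel decimal digits into a list, fold the carry over them, drain the carry, Horner-reassemble);
-- objective: alternative decomposition, no speed claim.

-- ===== PORT A =====
-- shared helper: the low-to-high decimal digits of d1 (B's phase 1; A's port uses
-- only its LENGTH as part of the fuel bound below)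
def pvDigits (d1 : Int) : List Int :=
  if h : 0 < d1 then PySem.Int.mod d1 10 :: pvDigits (PySem.Int.floordiv d1 10) else []
termination_by d1.natAbs
decreasing_by
  rw [PySem.Int.floordiv_eq_ediv_of_pos (by omega : (0:Int) < 10)]
  omega

-- A's while loop, one fuel unit per iteration (fuel is a totality device only:
-- the loop runs (pvDigits d1).length iterations while d1>0 and the carry-drain
-- tail is short on every input Pre_ admits)
def pvLoopA (b r2 : Int) : Nat → Int → Int → Int → Int → Int
  | 0, _, _, _, ans => ans
  | fuel+1, d1, c, p, ans =>
    if 0 < d1 ∨ 0 < c then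
      let r1 := PySem.Int.mod d1 10
      let d1' := PySem.Int.floordiv d1 10
      let d := r1 * r2 + c
      pvLoopA b r2 fuel d1' (PySem.Int.floordiv d b) (p * 10) (ans + p * PySem.Int.mod d b)
    else ans

def SingleMul (b : Int) (d1 : Int) (r2 : Int) : Int :=
  pvLoopA b r2 ((pvDigits d1).length + 128) d1 0 1 0

-- ===== PORT B =====
-- phase 2: fold multiply-with-carry over the digit list; returns (emitted base-b digits, final carry)
def pvMulDigits (b r2 : Int) : List Int → Int → List Int × Int
  | [], c => ([], c)
  | g :: gs, c =>
    let d := g * r2 + c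
    let rest := pvMulDigits b r2 gs (PySem.Int.floordiv d b)
    (PySem.Int.mod d b :: rest.1, rest.2)

-- drain the remaining carry (fueled totality device, like A's loop)
def pvDrain (b : Int) : Nat → Int → List Int
  | 0, _ => []
  | fuel+1, c =>
    if 0 < c then PySem.Int.mod c b :: pvDrain b fuel (PySem.Int.floordiv c b) else []

-- reassemble: Horner pass over the reversed digit list (ans = ans*10 + dig)
def pvHorner : List Int → Int → Int
  | [], ans => ans
  | d :: ds, ans => pvHorner ds (ans * 10 + d)

def SingleMul_alt (b : Int) (d1 : Int) (r2 : Int) : Int :=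
  let digits := pvDigits d1
  let res := pvMulDigits b r2 digits 0
  let out := res.1 ++ pvDrain b 128 res.2
  pvHorner out.reverse 0

-- ===== PRECONDITION & SPEC =====
-- Pre_ excludes b ∈ {0,1} when d1 > 0: there A raises ZeroDivisionError (b = 0) or
-- can loop forever (b = 1); on the few such inputs where A still returns (b = 1 with
-- the carry never positive) B's loop also terminates with the same value, but the
-- region as a whole is a crash/divergence region.
def Pre_SingleMul (b : Int) (d1 : Int) (r2 : Int) : Prop := d1 ≤ 0 ∨ (b ≠ 0 ∧ b ≠ 1)
instance (b : Int) (d1 : Int) (r2 : Int) : Decidable (Pre_SingleMul b d1 r2) := by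
  unfold Pre_SingleMul; infer_instance
def pvWitness_SingleMul : Int × Int × Int := (10, 23, 7)

def Spec_SingleMul (b : Int) (d1 : Int) (r2 : Int) (out : Int) : Prop := out = SingleMul_alt b d1 r2
instance (b : Int) (d1 : Int) (r2 : Int) (out : Int) : Decidable (Spec_SingleMul b d1 r2 out) := by
  unfold Spec_SingleMul; infer_instance

-- ===== CLAIM (what is proved, stated in full; the proofs are below) =====
def Claim_equal_SingleMul : Prop := ∀ (b : Int) (d1 : Int) (r2 : Int), Dom_SingleMul b d1 r2 → Pre_SingleMul b d1 r2 → Spec_SingleMul b d1 r2 (SingleMul b d1 r2)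

-- ===== LEMMAS AND PROOFS =====

-- value of a low-to-high digit list
def pvEval : List Int → Int
  | [] => 0
  | d :: ds => d + 10 * pvEval ds

theorem pvHorner_append (d : Int) : ∀ (xs : List Int) (a : Int),
    pvHorner (xs ++ [d]) a = pvHorner xs a * 10 + d := by
  intro xs
  induction xs with
  | nil => intro a; simp [pvHorner]
  | cons x xs ih => intro a; simp [pvHorner, ih]

theorem pvHorner_reverse : ∀ (l : List Int), pvHorner l.reverse 0 = pvEval l := by
  intro l
  induction l with
  | nil => simp [pvHorner, pvEval]
  | cons d ds ih =>
    simp only [List.reverse_cons, pvHorner_append, ih, pvEval]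
    ring

theorem pvEval_append : ∀ (xs ys : List Int),
    pvEval (xs ++ ys) = pvEval xs + 10 ^ xs.length * pvEval ys := by
  intro xs ys
  induction xs with
  | nil => simp [pvEval]
  | cons x xs ih => simp [pvEval, ih, pow_succ]; ring

theorem pvMulDigits_length (b r2 : Int) : ∀ (gs : List Int) (c : Int),
    (pvMulDigits b r2 gs c).1.length = gs.length := by
  intro gs
  induction gs with
  | nil => intro c; simp [pvMulDigits]
  | cons g gs ih => intro c; simp [pvMulDigits, ih]

theorem pvLoopA_stop (b r2 : Int) (d1 c p ans : Int) (h : ¬ (0 < d1 ∨ 0 < c)) :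
    ∀ fuel, pvLoopA b r2 fuel d1 c p ans = ans := by
  intro fuel
  cases fuel with
  | zero => rfl
  | succ n => simp [pvLoopA, h]

theorem pvDrain_stop (b c : Int) (h : ¬ 0 < c) : ∀ fuel, pvDrain b fuel c = [] := by
  intro fuel
  cases fuel with
  | zero => rfl
  | succ n => simp [pvDrain, h]

-- A's loop with d1 = 0 is exactly B's carry drain, step for step (same fuel)
theorem pvLoopA_drain (b r2 : Int) : ∀ (fuel : Nat) (c p ans : Int),
    pvLoopA b r2 fuel 0 c p ans = ans + p * pvEval (pvDrain b fuel c) := by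
  intro fuel
  induction fuel with
  | zero => intro c p ans; simp [pvLoopA, pvDrain, pvEval]
  | succ n ih =>
    intro c p ans
    by_cases hc : 0 < c
    · have h0 : PySem.Int.mod (0 : Int) 10 = 0 := by
        rw [PySem.Int.mod_eq_emod_of_pos (by omega : (0:Int) < 10)]; simp
      have h1 : PySem.Int.floordiv (0 : Int) 10 = 0 := by
        rw [PySem.Int.floordiv_eq_ediv_of_pos (by omega : (0:Int) < 10)]; simp
      simp only [pvLoopA, pvDrain, hc, if_pos, lt_irrefl, false_or, h0, h1]
      rw [ih]
      simp [pvEval]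
      ring
    · simp [pvLoopA, pvDrain, hc, pvEval]

-- A's loop while d1 > 0 is exactly B's fold over the digit list
theorem pvLoopA_phase1 (b r2 : Int) (d1 : Int) (hd1 : 0 ≤ d1) :
    ∀ (F : Nat) (c p ans : Int),
      pvLoopA b r2 ((pvDigits d1).length + F) d1 c p ans
        = pvLoopA b r2 F 0 (pvMulDigits b r2 (pvDigits d1) c).2
            (p * 10 ^ (pvDigits d1).length)
            (ans + p * pvEval (pvMulDigits b r2 (pvDigits d1) c).1) := by
  by_cases h : 0 < d1
  · have hq : 0 ≤ PySem.Int.floordiv d1 10 := by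
      rw [PySem.Int.floordiv_eq_ediv_of_pos (by omega : (0:Int) < 10)]; omega
    have hlt : (PySem.Int.floordiv d1 10).natAbs < d1.natAbs := by
      rw [PySem.Int.floordiv_eq_ediv_of_pos (by omega : (0:Int) < 10)]; omega
    have ih := pvLoopA_phase1 b r2 (PySem.Int.floordiv d1 10) hq
    intro F c p ans
    rw [pvDigits, dif_pos h]
    have hfuel : (PySem.Int.mod d1 10 :: pvDigits (PySem.Int.floordiv d1 10)).length + F
        = ((pvDigits (PySem.Int.floordiv d1 10)).length + F) + 1 := by
      simp; omega
    rw [hfuel]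
    simp only [pvLoopA, h, true_or, if_true]
    rw [ih]
    simp only [pvMulDigits, pvEval, List.length_cons]
    ring_nf
  · have hz : d1 = 0 := by omega
    subst hz
    intro F c p ans
    rw [pvDigits]
    simp [pvMulDigits, pvEval]
termination_by d1.natAbs

-- ===== VERDICT (by name: the statement is the Claim_ definition above) =====
theorem SingleMul_spec : Claim_equal_SingleMul := by
  intro b d1 r2 _hdom _hpre
  show SingleMul b d1 r2 = SingleMul_alt b d1 r2
  unfold SingleMul SingleMul_alt
  by_cases hd1 : 0 ≤ d1
  · rw [pvLoopA_phase1 b r2 d1 hd1 128 0 1 0]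
    rw [pvLoopA_drain]
    rw [pvHorner_reverse, pvEval_append, pvMulDigits_length]
    ring
  · have hdig : pvDigits d1 = [] := by rw [pvDigits, dif_neg (by omega)]
    rw [hdig]
    rw [pvLoopA_stop b r2 d1 0 1 0 (by omega)]
    simp [pvMulDigits, pvDrain_stop b 0 (by omega), pvHorner]
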